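-- pv_equiv track=rewrite | github.com/Oscarangellll/H25-Prosjektoppgave-Modell_Implementation | weather_generation.py | longest_resource_window
-- ===== SOURCE A (Python) =====
-- from typing import Tuple, List, Dict
--
-- def longest_resource_window(operational_hours: List[int], min_window: int = 5) -> int:
--     max_window = 0
--     current_window = 0
--     for operational_hour in operational_hours:
--         if operational_hour:
--             current_window += 1
--             max_window = max(max_window, current_window)
--         else:
--             current_window = 0
--     return max_window if max_window >= min_window else 0
-- ===== SOURCE B (Python) =====
-- from itertools import groupby
-- from typing import List
--
-- def longest_resource_window(operational_hours: List[int], min_window: int = 5) -> int: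
--     m = max((sum(1 for _ in g) for k, g in groupby(operational_hours, key=bool) if k),
--             default=0)
--     return m if m >= min_window else 0
-- ===== Notes on version B (the rewrite author's own statement) =====
-- stated objective: idiomatic
-- what changed: Replaces the manual running-counter loop with an itertools.groupby decomposition into maximal truthy runs, taking the max run length via a generator expression.
import Mathlib
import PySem

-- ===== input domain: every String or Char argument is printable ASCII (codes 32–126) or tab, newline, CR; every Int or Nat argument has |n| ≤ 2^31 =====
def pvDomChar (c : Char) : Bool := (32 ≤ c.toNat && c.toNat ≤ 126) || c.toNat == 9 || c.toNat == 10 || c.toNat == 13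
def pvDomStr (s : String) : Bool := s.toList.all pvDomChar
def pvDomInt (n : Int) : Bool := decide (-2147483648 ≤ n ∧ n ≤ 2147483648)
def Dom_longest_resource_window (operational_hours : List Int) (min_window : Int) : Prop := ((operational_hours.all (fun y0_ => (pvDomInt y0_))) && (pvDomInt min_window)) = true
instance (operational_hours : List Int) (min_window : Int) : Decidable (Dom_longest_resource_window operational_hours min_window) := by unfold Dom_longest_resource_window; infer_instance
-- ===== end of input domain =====

-- B replaces A's manual running-counter loop with a groupby-style decomposition into
-- maximal truthy runs (idiomatic; same O(n) cost).


-- ===== PORT A =====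
-- A's loop body: carry (max_window, current_window); `if operational_hour:` is truthiness = x ≠ 0.
def lrwStep (s : Int × Int) (x : Int) : Int × Int :=
  if x ≠ 0 then (max s.1 (s.2 + 1), s.2 + 1) else (s.1, 0)

def longest_resource_window (operational_hours : List Int) (min_window : Int) : Int :=
  let r := operational_hours.foldl lrwStep (0, 0)
  if r.1 ≥ min_window then r.1 else 0

-- ===== PORT B =====
-- termination helper for lrwMaxRun (cited by name in decreasing_by)
theorem lrw_rest_lt (x : Int) (t : List Int) :
    (((x :: t).dropWhile (fun y => y != 0)).dropWhile (fun y => y == 0)).length < (x :: t).length := by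
  rw [List.dropWhile_cons]
  by_cases hx : x = 0
  · simp only [hx]
    norm_num
    exact List.length_dropWhile_le _ _
  · simp only [bne_iff_ne, ne_eq, hx, not_false_eq_true, if_true]
    have h1 := List.length_dropWhile_le (fun y : Int => y == 0) (t.dropWhile (fun y => y != 0))
    have h2 := List.length_dropWhile_le (fun y : Int => y != 0) t
    simp only [List.length_cons]
    omega

-- B's groupby: the maximal truthy run at the front, then recurse past the following falsy run.
def lrwMaxRun (xs : List Int) : Int :=
  match xs with
  | [] => 0
  | x :: t =>
    -- length of the leading truthy group, then recurse past the following falsy group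
    max ((((x :: t).takeWhile (fun y => y != 0)).length : Int))
      (lrwMaxRun (((x :: t).dropWhile (fun y => y != 0)).dropWhile (fun y => y == 0)))
termination_by xs.length
decreasing_by exact lrw_rest_lt x t

def longest_resource_window_alt (operational_hours : List Int) (min_window : Int) : Int :=
  let m := lrwMaxRun operational_hours
  if m ≥ min_window then m else 0

-- ===== PRECONDITION & SPEC =====
def Spec_longest_resource_window (operational_hours : List Int) (min_window : Int) (out : Int) : Prop := out = longest_resource_window_alt operational_hours min_window
instance (operational_hours : List Int) (min_window : Int) (out : Int) : Decidable (Spec_longest_resource_window operational_hours min_window out) := by unfold Spec_longest_resource_window; infer_instance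

-- ===== CLAIM (what is proved, stated in full; the proofs are below) =====
def Claim_equal_longest_resource_window : Prop := ∀ (operational_hours : List Int) (min_window : Int), Dom_longest_resource_window operational_hours min_window → Spec_longest_resource_window operational_hours min_window (longest_resource_window operational_hours min_window)

-- ===== LEMMAS AND PROOFS =====

-- unfolding lemma for lrwMaxRun on a cons cell
theorem lrw_unf (x : Int) (t : List Int) :
    lrwMaxRun (x :: t) = max ((((x :: t).takeWhile (fun y => y != 0)).length : Int))
      (lrwMaxRun (((x :: t).dropWhile (fun y => y != 0)).dropWhile (fun y => y == 0))) := by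
  rw [lrwMaxRun.eq_def]

-- the fold's max component never decreases
theorem lrw_fold_mono (xs : List Int) : ∀ a c : Int, a ≤ (xs.foldl lrwStep (a, c)).1 := by
  induction xs with
  | nil => intro a c; simp
  | cons x t ih =>
    intro a c
    simp only [List.foldl, lrwStep]
    by_cases hx : x = 0
    · simp only [hx, ne_eq, not_true_eq_false, if_false]
      exact ih a 0
    · simp only [hx, ne_eq, not_false_iff, if_true]
      exact le_trans (le_max_left a (c + 1)) (ih _ _)

-- shift lemma: the accumulator's max component factors out of the fold
theorem lrw_fold_shift (xs : List Int) : ∀ a c : Int, 0 ≤ a → 0 ≤ c →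
    (xs.foldl lrwStep (a, c)).1 = max a (xs.foldl lrwStep (0, c)).1 := by
  induction xs with
  | nil => intro a c ha hc; simp; omega
  | cons x t ih =>
    intro a c ha hc
    simp only [List.foldl, lrwStep]
    by_cases hx : x = 0
    · simp only [hx, ne_eq, not_true_eq_false, if_false]
      exact ih a 0 ha le_rfl
    · simp only [hx, ne_eq, not_false_iff, if_true]
      rw [ih (max a (c + 1)) (c + 1) (by omega) (by omega),
          ih (max 0 (c + 1)) (c + 1) (by omega) (by omega)]
      omega

-- leading zeros do not affect the fold started at (0, 0)
theorem lrw_drop_zeros (s : List Int) :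
    ((s.dropWhile (fun x => x == 0)).foldl lrwStep (0, 0)).1 = (s.foldl lrwStep (0, 0)).1 := by
  induction s with
  | nil => simp
  | cons y u ih =>
    by_cases hy : y = 0
    · subst hy
      have h : ((0 :: u : List Int).dropWhile (fun x => x == 0)) = u.dropWhile (fun x => x == 0) := by
        simp
      rw [h, ih]
      simp [List.foldl, lrwStep]
    · simp [hy]

-- run lemma: folding with counter c is c plus the leading truthy run, maxed against
-- restarting from zero after that run
theorem lrw_run (t : List Int) : ∀ c : Int, 0 ≤ c →
    max c (t.foldl lrwStep (0, c)).1 =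
    max (c + ((t.takeWhile (fun x => x != 0)).length : Int))
        (max 0 ((t.dropWhile (fun x => x != 0)).foldl lrwStep (0, 0)).1) := by
  induction t with
  | nil => intro c hc; simp
  | cons y u ih =>
    intro c hc
    by_cases hy : y = 0
    · subst hy
      have ht : ((0 :: u : List Int).takeWhile (fun x => x != 0)) = [] := by
        simp
      have hd : ((0 :: u : List Int).dropWhile (fun x => x != 0)) = 0 :: u := by
        simp
      have hf : ((0 :: u : List Int).foldl lrwStep (0, 0)) = u.foldl lrwStep (0, 0) := by
        simp [List.foldl, lrwStep]
      have hg : ((0 :: u : List Int).foldl lrwStep (0, c)) = u.foldl lrwStep (0, 0) := by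
        simp [List.foldl, lrwStep]
      rw [ht, hd, hg, hf]
      have h0 : (0 : Int) ≤ (u.foldl lrwStep (0, 0)).1 := lrw_fold_mono u 0 0
      simp only [List.length_nil]
      omega
    · have ht : ((y :: u).takeWhile (fun x => x != 0)) = y :: u.takeWhile (fun x => x != 0) := by
        simp [hy]
      have hd : ((y :: u).dropWhile (fun x => x != 0)) = u.dropWhile (fun x => x != 0) := by
        simp [hy]
      rw [ht, hd]
      simp only [List.foldl, lrwStep, hy, ne_eq, not_false_iff, if_true]
      rw [lrw_fold_shift u (max 0 (c + 1)) (c + 1) (by omega) (by omega)]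
      have hrec := ih (c + 1) (by omega)
      simp only [List.length_cons]
      push_cast
      omega

-- main lemma: A's fold computes B's maximal-run maximum
theorem lrw_main (xs : List Int) : (xs.foldl lrwStep (0, 0)).1 = lrwMaxRun xs := by
  induction xs using lrwMaxRun.induct with
  | case1 => simp [lrwMaxRun]
  | case2 x t ih =>
    rw [lrw_unf]
    rw [← ih]
    by_cases hx : x = 0
    · subst hx
      have ht : ((0 :: t : List Int).takeWhile (fun y => y != 0)) = [] := by
        simp
      have hd : ((0 :: t : List Int).dropWhile (fun y => y != 0)) = 0 :: t := by
        simp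
      have hf : ((0 :: t : List Int).foldl lrwStep (0, 0)) = t.foldl lrwStep (0, 0) := by
        simp [List.foldl, lrwStep]
      simp only [ht, hd]
      rw [lrw_drop_zeros (0 :: t), hf]
      have h0 : (0 : Int) ≤ (t.foldl lrwStep (0, 0)).1 := lrw_fold_mono t 0 0
      simp only [List.length_nil]
      omega
    · have ht : ((x :: t).takeWhile (fun y => y != 0)) = x :: t.takeWhile (fun y => y != 0) := by
        simp [hx]
      have hd : ((x :: t).dropWhile (fun y => y != 0)) = t.dropWhile (fun y => y != 0) := by
        simp [hx]
      simp only [ht, hd]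
      rw [lrw_drop_zeros (t.dropWhile (fun y => y != 0))]
      simp only [List.foldl, lrwStep, hx, ne_eq, not_false_iff, if_true]
      rw [lrw_fold_shift t (max 0 (0 + 1)) (0 + 1) (by omega) (by omega)]
      have hrec := lrw_run t 1 (by omega)
      have h0 : (0 : Int) ≤ (t.foldl lrwStep (0, 1)).1 := lrw_fold_mono t 0 1
      simp only [List.length_cons]
      push_cast
      omega

-- ===== VERDICT (by name: the statement is the Claim_ definition above) =====
theorem longest_resource_window_spec : Claim_equal_longest_resource_window := by
  intro xs mw _
  unfold Spec_longest_resource_window longest_resource_window longest_resource_window_alt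
  simp only [lrw_main]
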